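-- pv_equiv track=rewrite | github.com/aviswerdlow/k4 | 04_EXPERIMENTS/cadence_panel/scripts/levenshtein.py | check_k_quirks
-- ===== SOURCE A (Python) =====
-- def levenshtein_distance(s1, s2, uv_equiv=False):
--     """
--     Compute Levenshtein distance between two strings.
--
--     Args:
--         s1, s2: strings to compare
--         uv_equiv: if True, treat U and V as equivalent
--
--     Returns:
--         int: minimum edit distance
--     """
--     # Apply U/V equivalence if requested
--     if uv_equiv:
--         s1 = s1.replace('V', 'U')
--         s2 = s2.replace('V', 'U')
--
--     # Standard DP algorithm for Levenshtein distance
--     m, n = len(s1), len(s2)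
--
--     # Create DP table
--     dp = [[0] * (n + 1) for _ in range(m + 1)]
--
--     # Initialize base cases
--     for i in range(m + 1):
--         dp[i][0] = i
--     for j in range(n + 1):
--         dp[0][j] = j
--
--     # Fill DP table
--     for i in range(1, m + 1):
--         for j in range(1, n + 1):
--             if s1[i-1] == s2[j-1]:
--                 dp[i][j] = dp[i-1][j-1]  # No change needed
--             else:
--                 dp[i][j] = 1 + min(
--                     dp[i-1][j],      # Deletion
--                     dp[i][j-1],      # Insertion
--                     dp[i-1][j-1]     # Substitution
--                 )
--
--     return dp[m][n]
--
-- def check_k_quirks(word):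
--     """
--     Check if word matches known K-style quirks.
--
--     Returns:
--         tuple: (is_quirk, standard_form, distance)
--     """
--     quirks = {
--         'IQLUSION': 'ILLUSION',
--         'UNDERGRUUND': 'UNDERGROUND',
--         'DESPARATLY': 'DESPERATELY'
--     }
--
--     if word in quirks:
--         standard = quirks[word]
--         dist = levenshtein_distance(word, standard)
--         return True, standard, dist
--
--     # Check if word is distance-1 from any quirk
--     for quirk, standard in quirks.items():
--         if levenshtein_distance(word, quirk) <= 1:
--             return True, standard, levenshtein_distance(word, standard)
--
--     return False, None, None
-- ===== SOURCE B (Python) =====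
-- def levenshtein_distance(s1, s2, uv_equiv=False):
--     """Levenshtein distance via top-down memoized recursion on prefix lengths."""
--     if uv_equiv:
--         s1 = s1.replace('V', 'U')
--         s2 = s2.replace('V', 'U')
--     memo = {}
--
--     def d(i, j):
--         if i == 0:
--             return j
--         if j == 0:
--             return i
--         key = (i, j)
--         if key not in memo:
--             if s1[i - 1] == s2[j - 1]:
--                 memo[key] = d(i - 1, j - 1)
--             else:
--                 memo[key] = 1 + min(d(i - 1, j), d(i, j - 1), d(i - 1, j - 1))
--         return memo[key]
--
--     return d(len(s1), len(s2))
--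
-- def _within_one_edit(a, b):
--     """True iff the edit distance of a and b is <= 1, by direct case analysis
--     on the possible single edit (no DP): equality, one substitution, or one
--     deletion from the longer string."""
--     if a == b:
--         return True
--     if len(a) == len(b):
--         return sum(x != y for x, y in zip(a, b)) == 1
--     if len(a) == len(b) + 1:
--         return any(a[:i] + a[i + 1:] == b for i in range(len(a)))
--     if len(b) == len(a) + 1:
--         return any(b[:i] + b[i + 1:] == a for i in range(len(b)))
--     return False
--
-- def check_k_quirks(word):
--     """Single scan over the quirk table; the O(n) one-edit check replaces both
--     A's exact-match fast path (distance 0) and its DP distance test."""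
--     quirks = {
--         'IQLUSION': 'ILLUSION',
--         'UNDERGRUUND': 'UNDERGROUND',
--         'DESPARATLY': 'DESPERATELY'
--     }
--     for quirk, standard in quirks.items():
--         if _within_one_edit(word, quirk):
--             return True, standard, levenshtein_distance(word, standard)
--     return False, None, None
-- ===== Notes on version B (the rewrite author's own statement) =====
-- stated objective: alternative
-- what changed: The distance<=1 test is no longer a DP at all: a new _within_one_edit does an O(n) case analysis on the single possible edit (equality, one substitution via a mismatch count over zip, or one deletion via slice comparisons), the reported distance is computed by top-down memoized recursion instead of A's bottom-up full table, and A's separate exact-match dict fast path is dropped (distance 0 is covered by the scan, and the fixed quirk keys are pairwise more than one edit apart).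
import Mathlib
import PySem

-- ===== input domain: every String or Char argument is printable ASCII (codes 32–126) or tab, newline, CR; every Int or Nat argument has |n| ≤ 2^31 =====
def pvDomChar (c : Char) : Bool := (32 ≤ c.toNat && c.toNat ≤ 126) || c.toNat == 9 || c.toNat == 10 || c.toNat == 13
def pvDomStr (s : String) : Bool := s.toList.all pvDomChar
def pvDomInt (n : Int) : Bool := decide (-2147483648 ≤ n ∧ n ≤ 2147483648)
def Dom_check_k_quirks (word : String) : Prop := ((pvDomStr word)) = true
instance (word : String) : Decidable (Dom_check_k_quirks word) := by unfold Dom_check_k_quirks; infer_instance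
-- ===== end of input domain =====

-- B tests "within one edit" by a direct O(n) case analysis on the single possible edit
-- (equality / one substitution / one deletion from the longer string) instead of running
-- A's full DP, computes the reported distance by top-down memoized recursion instead of
-- A's bottom-up table, and drops A's separate exact-match dict fast path (objective: alternative).

-- ===== PORT A =====
-- read dp[i][j] (all of A's reads are in range)
def pvGetDp (dp : List (List Int)) (i j : Nat) : Int := (dp.getD i []).getD j 0

-- the full-table DP of A's levenshtein_distance, on char lists
def pvLevACore (t1 t2 : List Char) : Int :=
  let m := t1.length
  let n := t2.length
  let dp : List (List Int) := List.replicate (m+1) (List.replicate (n+1) 0)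
  let dp := (List.range (m+1)).foldl (fun dp i => dp.set i ((dp.getD i []).set 0 (i:Int))) dp
  let dp := (List.range (n+1)).foldl (fun dp j => dp.set 0 ((dp.getD 0 []).set j (j:Int))) dp
  -- for i in range(1, m+1): for j in range(1, n+1):  (i0 = i-1, j0 = j-1)
  let dp := (List.range m).foldl (fun dp i0 =>
      (List.range n).foldl (fun dp j0 =>
        dp.set (i0+1) ((dp.getD (i0+1) []).set (j0+1)
          (if t1.getD i0 ' ' == t2.getD j0 ' ' then pvGetDp dp i0 j0
           else 1 + min (min (pvGetDp dp i0 (j0+1)) (pvGetDp dp (i0+1) j0)) (pvGetDp dp i0 j0)))) dp) dp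
  pvGetDp dp m n

def pvLevA (s1 s2 : String) (uv_equiv : Bool) : Int :=
  let s1 := if uv_equiv then PySem.Str.replace s1 "V" "U" else s1
  let s2 := if uv_equiv then PySem.Str.replace s2 "V" "U" else s2
  pvLevACore s1.toList s2.toList

def pvQuirksA : PySem.Dict String String :=
  PySem.Dict.ofList [("IQLUSION", "ILLUSION"), ("UNDERGRUUND", "UNDERGROUND"), ("DESPARATLY", "DESPERATELY")]

-- A's for-loop over quirks.items() with early return
def pvLoopA (w : String) : List (String × String) → Bool × Option String × Option Int
  | [] => (false, none, none)
  | (quirk, standard) :: rest =>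
    if pvLevA w quirk false ≤ 1 then (true, some standard, some (pvLevA w standard false))
    else pvLoopA w rest

def check_k_quirks (word : String) : Bool × Option String × Option Int :=
  match PySem.Dict.get? pvQuirksA word with
  | some standard => (true, some standard, some (pvLevA word standard false))
  | none => pvLoopA word pvQuirksA.items

-- ===== PORT B =====
-- B's inner d(i, j): top-down recursion on prefix lengths, memo threaded through
def pvLevMemo (t1 t2 : List Char) : Nat → Nat → PySem.Dict (Nat × Nat) Int → Int × PySem.Dict (Nat × Nat) Int
  | 0, j, memo => ((j : Int), memo)
  | i+1, 0, memo => ((i : Int) + 1, memo)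
  | i+1, j+1, memo =>
    match memo.get? (i+1, j+1) with
    | some v => (v, memo)
    | none =>
      let p :=
        if t1.getD i ' ' == t2.getD j ' ' then
          pvLevMemo t1 t2 i j memo
        else
          let q1 := pvLevMemo t1 t2 i (j+1) memo
          let q2 := pvLevMemo t1 t2 (i+1) j q1.2
          let q3 := pvLevMemo t1 t2 i j q2.2
          (1 + min (min q1.1 q2.1) q3.1, q3.2)
      (p.1, p.2.insert (i+1, j+1) p.1)
  termination_by i j _ => (i, j)

def pvLevB (s1 s2 : String) (uv_equiv : Bool) : Int :=
  let s1 := if uv_equiv then PySem.Str.replace s1 "V" "U" else s1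
  let s2 := if uv_equiv then PySem.Str.replace s2 "V" "U" else s2
  (pvLevMemo s1.toList s2.toList s1.toList.length s2.toList.length PySem.Dict.empty).1

-- B's _within_one_edit: direct case analysis, no DP
-- (a[:i] + a[i+1:] is ported as take i ++ drop (i+1): exact for 0 ≤ i < len(a);
--  sum(x != y for x, y in zip(a, b)) == 1 is ported as countP over the zip)
def pvWithin1 (a b : List Char) : Bool :=
  if a == b then true
  else if a.length == b.length then (a.zip b).countP (fun p => p.1 != p.2) == 1
  else if a.length == b.length + 1 then (List.range a.length).any (fun i => a.take i ++ a.drop (i+1) == b)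
  else if b.length == a.length + 1 then (List.range b.length).any (fun i => b.take i ++ b.drop (i+1) == a)
  else false

def pvQuirksB : PySem.Dict String String :=
  PySem.Dict.ofList [("IQLUSION", "ILLUSION"), ("UNDERGRUUND", "UNDERGROUND"), ("DESPARATLY", "DESPERATELY")]

def pvLoopB (w : String) : List (String × String) → Bool × Option String × Option Int
  | [] => (false, none, none)
  | (quirk, standard) :: rest =>
    if pvWithin1 w.toList quirk.toList then (true, some standard, some (pvLevB w standard false))
    else pvLoopB w rest

def check_k_quirks_alt (word : String) : Bool × Option String × Option Int :=
  pvLoopB word pvQuirksB.items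

-- ===== PRECONDITION & SPEC =====
def Spec_check_k_quirks (word : String) (out : Bool × Option String × Option Int) : Prop := out = check_k_quirks_alt word
instance (word : String) (out : Bool × Option String × Option Int) : Decidable (Spec_check_k_quirks word out) := by unfold Spec_check_k_quirks; infer_instance

-- ===== CLAIM (what is proved, stated in full; the proofs are below) =====
def Claim_equal_check_k_quirks : Prop := ∀ (word : String), Dom_check_k_quirks word → Spec_check_k_quirks word (check_k_quirks word)

-- ===== LEMMAS AND PROOFS =====

-- the textbook prefix-distance recurrence, the common spec of both distance ports
def pvF (t1 t2 : List Char) : Nat → Nat → Int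
  | 0, j => (j : Int)
  | i+1, 0 => ((i : Int)+1)
  | i+1, j+1 =>
    if t1.getD i ' ' == t2.getD j ' ' then pvF t1 t2 i j
    else 1 + min (min (pvF t1 t2 i (j+1)) (pvF t1 t2 (i+1) j)) (pvF t1 t2 i j)
  termination_by i j => (i, j)

-- full row i of the DP table
def pvFRow (t1 t2 : List Char) (i : Nat) : List Int :=
  (List.range (t2.length+1)).map (pvF t1 t2 i)

-- row i after its first k+1 entries have been filled
def pvPRow (t1 t2 : List Char) (i k : Nat) : List Int :=
  (List.range (k+1)).map (pvF t1 t2 i) ++ List.replicate (t2.length - k) 0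

-- row i right after A's base-case initialization
def pvInitRow (n : Nat) (i : Nat) : List Int :=
  (List.replicate (n+1) (0:Int)).set 0 (i:Int)

theorem pvF_zero_right (t1 t2 : List Char) (i : Nat) : pvF t1 t2 i 0 = (i:Int) := by
  cases i <;> simp [pvF]

theorem pvFRow_getD (t1 t2 : List Char) (i j : Nat) (h : j ≤ t2.length) :
    (pvFRow t1 t2 i).getD j 0 = pvF t1 t2 i j := by
  simpa [pvFRow] using PySem.List.getD_map_range (pvF t1 t2 i) (t2.length+1) j 0 (by omega)

theorem pvPRow_getD (t1 t2 : List Char) (i k j : Nat) (h : j ≤ k) :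
    (pvPRow t1 t2 i k).getD j 0 = pvF t1 t2 i j := by
  unfold pvPRow
  rw [List.getD_append _ _ _ _ (by simpa using by omega)]
  exact PySem.List.getD_map_range _ _ _ _ (by omega)

theorem pvPRow_zero (t1 t2 : List Char) (i : Nat) :
    pvPRow t1 t2 i 0 = pvInitRow t2.length i := by
  simp [pvPRow, pvInitRow, List.replicate_succ, pvF_zero_right]

theorem pvPRow_set (t1 t2 : List Char) (i k : Nat) (hk : k < t2.length) :
    (pvPRow t1 t2 i k).set (k+1) (pvF t1 t2 i (k+1)) = pvPRow t1 t2 i (k+1) := by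
  unfold pvPRow
  have h1 : t2.length - k = (t2.length - (k+1)) + 1 := by omega
  rw [h1, List.replicate_succ]
  rw [show k+1 = ((List.range (k+1)).map (pvF t1 t2 i)).length + 0 by simp]
  rw [List.set_append_right _ _ (by simp)]
  simp [List.range_succ]

theorem pvPRow_full (t1 t2 : List Char) (i : Nat) :
    pvPRow t1 t2 i t2.length = pvFRow t1 t2 i := by
  simp [pvPRow, pvFRow]

-- ---- A side: the full table's rows agree with the recurrence ----

theorem pvA_init1 (m n : Nat) : ∀ k, k ≤ m+1 →
    (List.range k).foldl (fun dp i => dp.set i ((dp.getD i []).set 0 (i:Int)))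
        (List.replicate (m+1) (List.replicate (n+1) (0:Int)))
      = (List.range k).map (pvInitRow n) ++ List.replicate (m+1-k) (List.replicate (n+1) (0:Int)) := by
  intro k
  induction k with
  | zero => simp
  | succ k ih =>
    intro hk
    rw [List.range_succ, List.foldl_append, ih (by omega)]
    simp only [List.foldl_cons, List.foldl_nil]
    have hrep : m+1-k = (m+1-(k+1)) + 1 := by omega
    rw [hrep, List.replicate_succ]
    have hget : (((List.range k).map (pvInitRow n) ++
        (List.replicate (n+1) (0:Int) :: List.replicate (m+1-(k+1)) (List.replicate (n+1) (0:Int)))).getD k [])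
        = List.replicate (n+1) (0:Int) := by
      rw [List.getD_append_right _ _ _ _ (by simp)]
      simp
    rw [hget]
    rw [show k = ((List.range k).map (pvInitRow n)).length + 0 by simp]
    rw [List.set_append_right _ _ (by simp)]
    simp [pvInitRow]

theorem pvA_row0_local : ∀ (k : Nat) (r0 : List Int) (rest : List (List Int)),
    (List.range k).foldl (fun dp j => dp.set 0 ((dp.getD 0 []).set j (j:Int))) (r0 :: rest)
      = ((List.range k).foldl (fun r j => r.set j (j:Int)) r0) :: rest := by
  intro k
  induction k with
  | zero => intro r0 rest; simp
  | succ k ih =>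
    intro r0 rest
    rw [List.range_succ, List.foldl_append, List.foldl_append, ih]
    simp [List.getD]

theorem pvA_init2 (n : Nat) : ∀ k, k ≤ n+1 →
    (List.range k).foldl (fun r j => r.set j (j:Int)) (pvInitRow n 0)
      = (List.range k).map (fun (j : Nat) => (j:Int)) ++ List.replicate (n+1-k) (0:Int) := by
  intro k
  induction k with
  | zero =>
    intro _
    simp [pvInitRow, List.replicate_succ]
  | succ k ih =>
    intro hk
    rw [List.range_succ, List.foldl_append, ih (by omega)]
    simp only [List.foldl_cons, List.foldl_nil]
    have hrep : n+1-k = (n+1-(k+1)) + 1 := by omega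
    rw [hrep, List.replicate_succ]
    rw [show k = ((List.range k).map (fun (j : Nat) => (j:Int))).length + 0 by simp]
    rw [List.set_append_right _ _ (by simp)]
    simp

theorem pvGetD_set_self (xs : List (List Int)) (i : Nat) (r : List Int) (h : i < xs.length) :
    (xs.set i r).getD i [] = r := by
  simp [List.getD, List.getElem?_set_self h]

theorem pvGetD_set_ne (xs : List (List Int)) (i k : Nat) (r : List Int) (h : i ≠ k) :
    (xs.set i r).getD k [] = xs.getD k [] := by
  simp [List.getD, List.getElem?_set_ne h]

theorem pvA_inner (t1 t2 : List Char) (i0 : Nat) (dp : List (List Int))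
    (hlen : i0 + 1 < dp.length)
    (hrow : dp.getD i0 [] = pvFRow t1 t2 i0)
    (hinit : dp.getD (i0+1) [] = pvInitRow t2.length (i0+1)) :
    ∀ k, k ≤ t2.length →
    (((List.range k).foldl (fun dp j0 =>
        dp.set (i0+1) ((dp.getD (i0+1) []).set (j0+1)
          (if t1.getD i0 ' ' == t2.getD j0 ' ' then pvGetDp dp i0 j0
           else 1 + min (min (pvGetDp dp i0 (j0+1)) (pvGetDp dp (i0+1) j0)) (pvGetDp dp i0 j0)))) dp).length = dp.length
      ∧ ((List.range k).foldl (fun dp j0 =>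
        dp.set (i0+1) ((dp.getD (i0+1) []).set (j0+1)
          (if t1.getD i0 ' ' == t2.getD j0 ' ' then pvGetDp dp i0 j0
           else 1 + min (min (pvGetDp dp i0 (j0+1)) (pvGetDp dp (i0+1) j0)) (pvGetDp dp i0 j0)))) dp).getD i0 [] = pvFRow t1 t2 i0
      ∧ ((List.range k).foldl (fun dp j0 =>
        dp.set (i0+1) ((dp.getD (i0+1) []).set (j0+1)
          (if t1.getD i0 ' ' == t2.getD j0 ' ' then pvGetDp dp i0 j0
           else 1 + min (min (pvGetDp dp i0 (j0+1)) (pvGetDp dp (i0+1) j0)) (pvGetDp dp i0 j0)))) dp).getD (i0+1) [] = pvPRow t1 t2 (i0+1) k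
      ∧ ∀ r, i0+1 < r → ((List.range k).foldl (fun dp j0 =>
        dp.set (i0+1) ((dp.getD (i0+1) []).set (j0+1)
          (if t1.getD i0 ' ' == t2.getD j0 ' ' then pvGetDp dp i0 j0
           else 1 + min (min (pvGetDp dp i0 (j0+1)) (pvGetDp dp (i0+1) j0)) (pvGetDp dp i0 j0)))) dp).getD r [] = dp.getD r []) := by
  intro k
  induction k with
  | zero =>
    intro _
    simp only [List.range_zero, List.foldl_nil]
    refine ⟨by simp, hrow, ?_, by simp⟩
    rw [pvPRow_zero]; exact hinit
  | succ k ih =>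
    intro hk
    obtain ⟨hl, h0, hi, hr⟩ := ih (by omega)
    rw [List.range_succ, List.foldl_append]
    simp only [List.foldl_cons, List.foldl_nil]
    generalize hG : (List.range k).foldl (fun dp j0 =>
        dp.set (i0+1) ((dp.getD (i0+1) []).set (j0+1)
          (if t1.getD i0 ' ' == t2.getD j0 ' ' then pvGetDp dp i0 j0
           else 1 + min (min (pvGetDp dp i0 (j0+1)) (pvGetDp dp (i0+1) j0)) (pvGetDp dp i0 j0)))) dp = dpk at hl h0 hi hr ⊢
    have hread0 : pvGetDp dpk i0 k = pvF t1 t2 i0 k := by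
      unfold pvGetDp; rw [h0]; exact pvFRow_getD _ _ _ _ (by omega)
    have hread1 : pvGetDp dpk i0 (k+1) = pvF t1 t2 i0 (k+1) := by
      unfold pvGetDp; rw [h0]; exact pvFRow_getD _ _ _ _ (by omega)
    have hread2 : pvGetDp dpk (i0+1) k = pvF t1 t2 (i0+1) k := by
      unfold pvGetDp; rw [hi]; exact pvPRow_getD _ _ _ _ _ (by omega)
    rw [hread0, hread1, hread2, hi]
    have hv : (if t1.getD i0 ' ' == t2.getD k ' ' then pvF t1 t2 i0 k
        else 1 + min (min (pvF t1 t2 i0 (k+1)) (pvF t1 t2 (i0+1) k)) (pvF t1 t2 i0 k))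
        = pvF t1 t2 (i0+1) (k+1) := by
      simp [pvF]
    rw [hv, pvPRow_set _ _ _ _ (by omega)]
    have hl' : i0 + 1 < dpk.length := by omega
    refine ⟨by simpa using hl, ?_, ?_, ?_⟩
    · rw [pvGetD_set_ne _ _ _ _ (by omega)]; exact h0
    · exact pvGetD_set_self _ _ _ hl'
    · intro r hr'
      rw [pvGetD_set_ne _ _ _ _ (by omega)]
      exact hr r hr'

theorem pvA_outer (t1 t2 : List Char) (dp2 : List (List Int))
    (hlen : dp2.length = t1.length + 1)
    (h0 : dp2.getD 0 [] = pvFRow t1 t2 0)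
    (hinit : ∀ r, 0 < r → r ≤ t1.length → dp2.getD r [] = pvInitRow t2.length r) :
    ∀ K, K ≤ t1.length →
    (((List.range K).foldl (fun dp i0 =>
      (List.range t2.length).foldl (fun dp j0 =>
        dp.set (i0+1) ((dp.getD (i0+1) []).set (j0+1)
          (if t1.getD i0 ' ' == t2.getD j0 ' ' then pvGetDp dp i0 j0
           else 1 + min (min (pvGetDp dp i0 (j0+1)) (pvGetDp dp (i0+1) j0)) (pvGetDp dp i0 j0)))) dp) dp2).length = dp2.length
    ∧ ((List.range K).foldl (fun dp i0 =>
      (List.range t2.length).foldl (fun dp j0 =>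
        dp.set (i0+1) ((dp.getD (i0+1) []).set (j0+1)
          (if t1.getD i0 ' ' == t2.getD j0 ' ' then pvGetDp dp i0 j0
           else 1 + min (min (pvGetDp dp i0 (j0+1)) (pvGetDp dp (i0+1) j0)) (pvGetDp dp i0 j0)))) dp) dp2).getD K [] = pvFRow t1 t2 K
    ∧ ∀ r, K < r → r ≤ t1.length → ((List.range K).foldl (fun dp i0 =>
      (List.range t2.length).foldl (fun dp j0 =>
        dp.set (i0+1) ((dp.getD (i0+1) []).set (j0+1)
          (if t1.getD i0 ' ' == t2.getD j0 ' ' then pvGetDp dp i0 j0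
           else 1 + min (min (pvGetDp dp i0 (j0+1)) (pvGetDp dp (i0+1) j0)) (pvGetDp dp i0 j0)))) dp) dp2).getD r [] = pvInitRow t2.length r) := by
  intro K
  induction K with
  | zero =>
    intro _
    simp only [List.range_zero, List.foldl_nil]
    exact ⟨trivial, h0, fun r h1 h2 => hinit r h1 h2⟩
  | succ K ih =>
    intro hK
    obtain ⟨hl, hK0, hKr⟩ := ih (by omega)
    rw [show List.range (K+1) = List.range K ++ [K] from List.range_succ, List.foldl_append]
    simp only [List.foldl_cons, List.foldl_nil]
    generalize hG : (List.range K).foldl (fun dp i0 =>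
      (List.range t2.length).foldl (fun dp j0 =>
        dp.set (i0+1) ((dp.getD (i0+1) []).set (j0+1)
          (if t1.getD i0 ' ' == t2.getD j0 ' ' then pvGetDp dp i0 j0
           else 1 + min (min (pvGetDp dp i0 (j0+1)) (pvGetDp dp (i0+1) j0)) (pvGetDp dp i0 j0)))) dp) dp2 = dpK at hl hK0 hKr ⊢
    obtain ⟨il, i0', ii, ir⟩ := pvA_inner t1 t2 K dpK (by omega) hK0
      (hKr (K+1) (by omega) (by omega)) t2.length le_rfl
    refine ⟨by omega, ?_, ?_⟩
    · rw [ii, pvPRow_full]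
    · intro r h1 h2
      rw [ir r (by omega)]
      exact hKr r (by omega) h2

theorem pvLevACore_eq (t1 t2 : List Char) :
    pvLevACore t1 t2 = pvF t1 t2 t1.length t2.length := by
  simp only [pvLevACore]
  rw [pvA_init1 t1.length t2.length (t1.length+1) le_rfl]
  simp only [Nat.sub_self, List.replicate_zero, List.append_nil]
  rw [List.range_succ_eq_map, List.map_cons]
  rw [pvA_row0_local]
  rw [pvA_init2 t2.length (t2.length+1) le_rfl]
  simp only [Nat.sub_self, List.replicate_zero, List.append_nil]
  have hrow0 : (List.range (t2.length+1)).map (fun (j : Nat) => (j:Int)) = pvFRow t1 t2 0 := by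
    exact List.map_congr_left (fun j _ => by simp [pvF])
  rw [hrow0]
  rw [List.map_map]
  have hd := pvA_outer t1 t2
    (pvFRow t1 t2 0 :: (List.range t1.length).map (pvInitRow t2.length ∘ Nat.succ))
    (by simp) (by simp) ?_ t1.length le_rfl
  · obtain ⟨_, hm, _⟩ := hd
    exact (congrArg (fun l => l.getD t2.length 0) hm).trans
      (pvFRow_getD t1 t2 t1.length t2.length le_rfl)
  · intro r h1 h2
    obtain ⟨r', rfl⟩ : ∃ r', r = r' + 1 := ⟨r - 1, by omega⟩
    simp only [List.getD_cons_succ]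
    rw [PySem.List.getD_map_range (pvInitRow t2.length ∘ Nat.succ) t1.length r' [] (by omega)]
    rfl

-- ---- B side, distance: the memoized recursion computes pvF ----

def pvGoodMemo (t1 t2 : List Char) (m : PySem.Dict (Nat × Nat) Int) : Prop :=
  ∀ p v, m.get? p = some v → v = pvF t1 t2 p.1 p.2

theorem pvGood_insert (t1 t2 : List Char) (m : PySem.Dict (Nat × Nat) Int)
    (hm : pvGoodMemo t1 t2 m) (p : Nat × Nat) (v : Int) (hv : v = pvF t1 t2 p.1 p.2) :
    pvGoodMemo t1 t2 (m.insert p v) := by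
  intro q w hq
  rw [PySem.Dict.get?_insert] at hq
  by_cases hqp : q = p
  · rw [if_pos hqp] at hq
    subst hqp
    cases hq
    exact hv
  · rw [if_neg hqp] at hq
    exact hm q w hq

theorem pvLevMemo_correct (t1 t2 : List Char) : ∀ n i j memo, i + j ≤ n → pvGoodMemo t1 t2 memo →
    (pvLevMemo t1 t2 i j memo).1 = pvF t1 t2 i j ∧ pvGoodMemo t1 t2 (pvLevMemo t1 t2 i j memo).2 := by
  intro n
  induction n with
  | zero =>
    intro i j memo hn hg
    obtain rfl : i = 0 := by omega
    obtain rfl : j = 0 := by omega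
    exact ⟨by simp [pvLevMemo, pvF], by simpa [pvLevMemo] using hg⟩
  | succ n ih =>
    intro i j memo hn hg
    match i, j with
    | 0, j =>
      exact ⟨by simp [pvLevMemo, pvF], by simpa [pvLevMemo] using hg⟩
    | i+1, 0 =>
      exact ⟨by simp [pvLevMemo, pvF], by simpa [pvLevMemo] using hg⟩
    | i+1, j+1 =>
      cases hm : memo.get? (i+1, j+1) with
      | some v =>
        rw [pvLevMemo, hm]
        exact ⟨hg (i+1, j+1) v hm, hg⟩
      | none =>
        rw [pvLevMemo, hm]
        by_cases hc : (t1.getD i ' ' == t2.getD j ' ') = true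
        · simp only [hc, if_true]
          obtain ⟨h1, h2⟩ := ih i j memo (by omega) hg
          have hval : (pvLevMemo t1 t2 i j memo).1 = pvF t1 t2 (i+1) (j+1) := by
            rw [h1, pvF, if_pos hc]
          exact ⟨hval, pvGood_insert t1 t2 _ h2 (i+1, j+1) _ hval⟩
        · rw [if_neg hc]
          obtain ⟨h1, g1⟩ := ih i (j+1) memo (by omega) hg
          obtain ⟨h2, g2⟩ := ih (i+1) j _ (by omega) g1
          obtain ⟨h3, g3⟩ := ih i j _ (by omega) g2
          have hval : (1 : Int) + min (min (pvLevMemo t1 t2 i (j+1) memo).1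
              (pvLevMemo t1 t2 (i+1) j (pvLevMemo t1 t2 i (j+1) memo).2).1)
              (pvLevMemo t1 t2 i j (pvLevMemo t1 t2 (i+1) j (pvLevMemo t1 t2 i (j+1) memo).2).2).1
              = pvF t1 t2 (i+1) (j+1) := by
            rw [h1, h2, h3, pvF, if_neg hc]
          exact ⟨hval, pvGood_insert t1 t2 _ g3 (i+1, j+1) _ hval⟩

theorem pvLev_core_eq (t1 t2 : List Char) :
    pvLevACore t1 t2 = (pvLevMemo t1 t2 t1.length t2.length PySem.Dict.empty).1 := by
  have hg : pvGoodMemo t1 t2 PySem.Dict.empty := by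
    intro p v h
    simp [PySem.Dict.get?_empty] at h
  rw [pvLevACore_eq]
  exact ((pvLevMemo_correct t1 t2 (t1.length + t2.length) t1.length t2.length
    PySem.Dict.empty le_rfl hg).1).symm

theorem pvLev_eq (s1 s2 : String) (uv : Bool) : pvLevA s1 s2 uv = pvLevB s1 s2 uv := by
  cases uv <;> exact pvLev_core_eq _ _

-- ---- B side, within-one: case analysis ⟺ distance ≤ 1 ----

-- head recursion for the same distance (used only in the proofs, via reversal)
def pvLevR : List Char → List Char → Int
  | [], ys => (ys.length : Int)
  | _::xs, [] => (xs.length : Int) + 1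
  | x::xs, y::ys =>
    if x == y then pvLevR xs ys
    else 1 + min (min (pvLevR xs (y::ys)) (pvLevR (x::xs) ys)) (pvLevR xs ys)
  termination_by a b => (a, b)

def pvIsSub (a b : List Char) : Prop := ∃ u c d v, c ≠ d ∧ a = u ++ c :: v ∧ b = u ++ d :: v
def pvIsDel (a b : List Char) : Prop := ∃ u c v, a = u ++ c :: v ∧ b = u ++ v
def pvEditSpec (a b : List Char) : Prop := a = b ∨ pvIsSub a b ∨ pvIsDel a b ∨ pvIsDel b a

theorem pvRevTake_succ (t : List Char) (i : Nat) (h : i < t.length) :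
    (t.take (i+1)).reverse = t[i] :: (t.take i).reverse := by
  rw [List.take_add_one, List.getElem?_eq_getElem h]
  simp

theorem pvF_eq_levR (t1 t2 : List Char) : ∀ n i j, i + j ≤ n → i ≤ t1.length → j ≤ t2.length →
    pvF t1 t2 i j = pvLevR ((t1.take i).reverse) ((t2.take j).reverse) := by
  intro n
  induction n with
  | zero =>
    intro i j hn _ _
    obtain rfl : i = 0 := by omega
    obtain rfl : j = 0 := by omega
    simp [pvF, pvLevR]
  | succ n ih =>
    intro i j hn hi hj
    match i, j with
    | 0, j =>
      simp [pvF, pvLevR, List.length_take, Nat.min_eq_left hj]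
    | i+1, 0 =>
      rw [pvRevTake_succ t1 i (by omega)]
      rw [pvF_zero_right]
      simp only [List.take_zero, List.reverse_nil, pvLevR]
      simp [List.length_take, Nat.min_eq_left (show i ≤ t1.length by omega)]
    | i+1, j+1 =>
      rw [pvRevTake_succ t1 i (by omega), pvRevTake_succ t2 j (by omega)]
      rw [pvF, pvLevR]
      have hg1 : t1.getD i ' ' = t1[i] := List.getD_eq_getElem t1 ' ' (by omega)
      have hg2 : t2.getD j ' ' = t2[j] := List.getD_eq_getElem t2 ' ' (by omega)
      rw [hg1, hg2]
      rw [← ih i j (by omega) (by omega) (by omega),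
          ← pvRevTake_succ t2 j (by omega),
          ← ih i (j+1) (by omega) (by omega) (by omega),
          ← pvRevTake_succ t1 i (by omega),
          ← ih (i+1) j (by omega) (by omega) (by omega)]
      rfl

theorem pvLevR_nonneg : ∀ a b : List Char, 0 ≤ pvLevR a b := by
  intro a
  induction a with
  | nil =>
    intro b
    simp [pvLevR]
  | cons x xs iha =>
    intro b
    induction b with
    | nil =>
      simp only [pvLevR]
      positivity
    | cons y ys ihb =>
      rw [pvLevR]
      by_cases h : (x == y) = true
      · rw [if_pos h]; exact iha ys
      · rw [if_neg h]
        have hm : (0:Int) ≤ min (min (pvLevR xs (y::ys)) (pvLevR (x::xs) ys)) (pvLevR xs ys) :=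
          le_min (le_min (iha (y::ys)) ihb) (iha ys)
        omega

theorem pvLevR_eq_zero_iff : ∀ a b : List Char, pvLevR a b = 0 ↔ a = b := by
  intro a
  induction a with
  | nil =>
    intro b
    cases b with
    | nil => simp [pvLevR]
    | cons y ys =>
      simp only [pvLevR]
      constructor
      · intro h; exfalso; simp only [List.length_cons] at h; omega
      · intro h; simp at h
  | cons x xs iha =>
    intro b
    cases b with
    | nil =>
      simp only [pvLevR]
      constructor
      · intro h; exfalso; omega
      · intro h; simp at h
    | cons y ys =>
      rw [pvLevR]
      by_cases h : (x == y) = true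
      · rw [if_pos h]
        rw [iha ys]
        have hxy : x = y := beq_iff_eq.mp h
        subst hxy
        simp
      · rw [if_neg h]
        have hxy : x ≠ y := fun he => h (beq_iff_eq.mpr he)
        have hm : (0:Int) ≤ min (min (pvLevR xs (y::ys)) (pvLevR (x::xs) ys)) (pvLevR xs ys) :=
          le_min (le_min (pvLevR_nonneg _ _) (pvLevR_nonneg _ _)) (pvLevR_nonneg _ _)
        constructor
        · intro he; omega
        · intro he
          exact absurd (List.cons.injEq .. ▸ congrArg id he) (by simp [hxy])

theorem pvIsSub_length {a b : List Char} (h : pvIsSub a b) : a.length = b.length := by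
  obtain ⟨u, c, d, v, _, rfl, rfl⟩ := h
  simp

theorem pvIsDel_length {a b : List Char} (h : pvIsDel a b) : a.length = b.length + 1 := by
  obtain ⟨u, c, v, rfl, rfl⟩ := h
  simp only [List.length_append, List.length_cons]
  omega

theorem pvIsSub_cons_iff (c : Char) (a b : List Char) : pvIsSub (c::a) (c::b) ↔ pvIsSub a b := by
  constructor
  · rintro ⟨u, e, d, v, hed, hu, hv⟩
    cases u with
    | nil =>
      simp only [List.nil_append, List.cons.injEq] at hu hv
      exact absurd (hu.1.symm.trans hv.1) hed
    | cons f u' =>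
      simp only [List.cons_append, List.cons.injEq] at hu hv
      exact ⟨u', e, d, v, hed, hu.2, hv.2⟩
  · rintro ⟨u, e, d, v, hed, rfl, rfl⟩
    exact ⟨c::u, e, d, v, hed, rfl, rfl⟩

theorem pvIsDel_cons_iff (c : Char) (a b : List Char) : pvIsDel (c::a) (c::b) ↔ pvIsDel a b := by
  constructor
  · rintro ⟨u, e, v, hu, hv⟩
    cases u with
    | nil =>
      simp only [List.nil_append, List.cons.injEq] at hu hv
      exact ⟨[], c, b, by simp [hu.2, ← hv], by simp⟩
    | cons f u' =>
      simp only [List.cons_append, List.cons.injEq] at hu hv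
      exact ⟨u', e, v, hu.2, hv.2⟩
  · rintro ⟨u, e, v, rfl, rfl⟩
    exact ⟨c::u, e, v, rfl, rfl⟩

theorem pvEditSpec_cons_iff (c : Char) (a b : List Char) :
    pvEditSpec (c::a) (c::b) ↔ pvEditSpec a b := by
  unfold pvEditSpec
  rw [pvIsSub_cons_iff, pvIsDel_cons_iff, pvIsDel_cons_iff]
  simp

theorem pvEditSpec_cons_ne (x y : Char) (xs ys : List Char) (hxy : x ≠ y) :
    pvEditSpec (x::xs) (y::ys) ↔ (xs = y::ys ∨ x::xs = ys ∨ xs = ys) := by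
  constructor
  · rintro (heq | hsub | hdel | hdel)
    · exact absurd (List.cons.injEq .. ▸ congrArg id heq) (by simp [hxy])
    · obtain ⟨u, e, d, v, hed, hu, hv⟩ := hsub
      cases u with
      | nil =>
        simp only [List.nil_append, List.cons.injEq] at hu hv
        exact Or.inr (Or.inr (hu.2.trans hv.2.symm))
      | cons f u' =>
        simp only [List.cons_append, List.cons.injEq] at hu hv
        exact absurd (hu.1.trans hv.1.symm) hxy
    · obtain ⟨u, e, v, hu, hv⟩ := hdel
      cases u with
      | nil =>
        simp only [List.nil_append, List.cons.injEq] at hu hv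
        exact Or.inl (hu.2.trans hv.symm)
      | cons f u' =>
        simp only [List.cons_append, List.cons.injEq] at hu hv
        exact absurd (hu.1.trans hv.1.symm) hxy
    · obtain ⟨u, e, v, hu, hv⟩ := hdel
      cases u with
      | nil =>
        simp only [List.nil_append, List.cons.injEq] at hu hv
        exact Or.inr (Or.inl (hv.trans hu.2.symm))
      | cons f u' =>
        simp only [List.cons_append, List.cons.injEq] at hu hv
        exact absurd (hv.1.trans hu.1.symm) hxy
  · rintro (h | h | h)
    · exact Or.inr (Or.inr (Or.inl ⟨[], x, xs, rfl, by simp [h]⟩))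
    · exact Or.inr (Or.inr (Or.inr ⟨[], y, ys, rfl, by simpa using h⟩))
    · exact Or.inr (Or.inl ⟨[], x, y, xs, hxy, by simp, by simp [h]⟩)

theorem pvEditSpec_nil (b : List Char) : pvEditSpec [] b ↔ b.length ≤ 1 := by
  constructor
  · rintro (heq | hsub | hdel | hdel)
    · simp [← heq]
    · obtain ⟨u, c, d, v, _, hu, _⟩ := hsub
      exact absurd hu (by simp)
    · obtain ⟨u, c, v, hu, _⟩ := hdel
      exact absurd hu (by simp)
    · have := pvIsDel_length hdel
      simp at this ⊢
      omega
  · intro h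
    match b, h with
    | [], _ => exact Or.inl rfl
    | [c], _ => exact Or.inr (Or.inr (Or.inr ⟨[], c, [], rfl, rfl⟩))

theorem pvEditSpec_symm {a b : List Char} (h : pvEditSpec a b) : pvEditSpec b a := by
  rcases h with heq | hsub | hdel | hdel
  · exact Or.inl heq.symm
  · obtain ⟨u, c, d, v, hcd, h1, h2⟩ := hsub
    exact Or.inr (Or.inl ⟨u, d, c, v, hcd.symm, h2, h1⟩)
  · exact Or.inr (Or.inr (Or.inr hdel))
  · exact Or.inr (Or.inr (Or.inl hdel))

theorem pvLevR_le_one_iff : ∀ a b : List Char, pvLevR a b ≤ 1 ↔ pvEditSpec a b := by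
  intro a
  induction a with
  | nil =>
    intro b
    rw [pvEditSpec_nil]
    simp only [pvLevR]
    omega
  | cons x xs iha =>
    intro b
    induction b with
    | nil =>
      have h1 : pvLevR (x::xs) [] = (xs.length : Int) + 1 := by rw [pvLevR]
      rw [h1]
      have h2 : pvEditSpec (x::xs) [] ↔ pvEditSpec [] (x::xs) :=
        ⟨pvEditSpec_symm, pvEditSpec_symm⟩
      rw [h2, pvEditSpec_nil]
      simp only [List.length_cons]
      omega
    | cons y ys ihb =>
      rw [pvLevR]
      by_cases h : (x == y) = true
      · have hxy : x = y := beq_iff_eq.mp h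
        subst hxy
        rw [if_pos h, iha ys, pvEditSpec_cons_iff]
      · have hxy : x ≠ y := fun he => h (beq_iff_eq.mpr he)
        rw [if_neg h, pvEditSpec_cons_ne x y xs ys hxy]
        have n1 := pvLevR_nonneg xs (y::ys)
        have n2 := pvLevR_nonneg (x::xs) ys
        have n3 := pvLevR_nonneg xs ys
        constructor
        · intro hle
          have hm : min (min (pvLevR xs (y::ys)) (pvLevR (x::xs) ys)) (pvLevR xs ys) ≤ 0 := by omega
          rcases Std.min_le.mp hm with hm' | h3
          · rcases Std.min_le.mp hm' with h1' | h2'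
            · exact Or.inl ((pvLevR_eq_zero_iff _ _).mp (by omega))
            · exact Or.inr (Or.inl ((pvLevR_eq_zero_iff _ _).mp (by omega)))
          · exact Or.inr (Or.inr ((pvLevR_eq_zero_iff _ _).mp (by omega)))
        · rintro (h' | h' | h')
          · have : pvLevR xs (y::ys) = 0 := (pvLevR_eq_zero_iff _ _).mpr h'
            have hm : min (min (pvLevR xs (y::ys)) (pvLevR (x::xs) ys)) (pvLevR xs ys) ≤ 0 :=
              Std.min_le.mpr (Or.inl (Std.min_le.mpr (Or.inl (by omega))))
            omega
          · have : pvLevR (x::xs) ys = 0 := (pvLevR_eq_zero_iff _ _).mpr h'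
            have hm : min (min (pvLevR xs (y::ys)) (pvLevR (x::xs) ys)) (pvLevR xs ys) ≤ 0 :=
              Std.min_le.mpr (Or.inl (Std.min_le.mpr (Or.inr (by omega))))
            omega
          · have : pvLevR xs ys = 0 := (pvLevR_eq_zero_iff _ _).mpr h'
            have hm : min (min (pvLevR xs (y::ys)) (pvLevR (x::xs) ys)) (pvLevR xs ys) ≤ 0 :=
              Std.min_le.mpr (Or.inr (by omega))
            omega

theorem pvEditSpec_rev_of {a b : List Char} (h : pvEditSpec a b) :
    pvEditSpec a.reverse b.reverse := by
  rcases h with heq | hsub | hdel | hdel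
  · exact Or.inl (by rw [heq])
  · obtain ⟨u, c, d, v, hcd, rfl, rfl⟩ := hsub
    exact Or.inr (Or.inl ⟨v.reverse, c, d, u.reverse, hcd, by simp, by simp⟩)
  · obtain ⟨u, c, v, rfl, rfl⟩ := hdel
    exact Or.inr (Or.inr (Or.inl ⟨v.reverse, c, u.reverse, by simp, by simp⟩))
  · obtain ⟨u, c, v, rfl, rfl⟩ := hdel
    exact Or.inr (Or.inr (Or.inr ⟨v.reverse, c, u.reverse, by simp, by simp⟩))

theorem pvEditSpec_reverse (a b : List Char) : pvEditSpec a.reverse b.reverse ↔ pvEditSpec a b := by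
  constructor
  · intro h
    have := pvEditSpec_rev_of h
    simpa using this
  · exact pvEditSpec_rev_of

-- mismatch counting (the sum(x != y …) branch)
theorem pvCount_zero_iff : ∀ a b : List Char, a.length = b.length →
    ((a.zip b).countP (fun p => p.1 != p.2) = 0 ↔ a = b) := by
  intro a
  induction a with
  | nil =>
    intro b hb
    cases b with
    | nil => simp
    | cons y ys => simp at hb
  | cons x xs iha =>
    intro b hb
    cases b with
    | nil => simp at hb
    | cons y ys =>
      simp only [List.zip_cons_cons, List.countP_cons]
      by_cases hxy : x = y
      · subst hxy
        rw [if_neg (by simp), Nat.add_zero]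
        rw [iha ys (by simpa using hb)]
        simp
      · have hne : (x != y) = true := bne_iff_ne.mpr hxy
        rw [if_pos hne]
        constructor
        · intro h; omega
        · intro h
          simp only [List.cons.injEq] at h
          exact absurd h.1 hxy
  
theorem pvCount_one_iff : ∀ a b : List Char, a.length = b.length →
    ((a.zip b).countP (fun p => p.1 != p.2) = 1 ↔ pvIsSub a b) := by
  intro a
  induction a with
  | nil =>
    intro b hb
    obtain rfl : b = [] := by cases b; rfl; simp at hb
    constructor
    · intro h; simp at h
    · rintro ⟨u, c, d, v, _, hu, _⟩
      exact absurd hu (by simp)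
  | cons x xs iha =>
    intro b hb
    cases b with
    | nil => simp at hb
    | cons y ys =>
      have hb' : xs.length = ys.length := by simpa using hb
      simp only [List.zip_cons_cons, List.countP_cons]
      by_cases hxy : x = y
      · subst hxy
        rw [if_neg (by simp), Nat.add_zero]
        rw [iha ys hb', pvIsSub_cons_iff]
      · have hne : (x != y) = true := bne_iff_ne.mpr hxy
        rw [if_pos hne]
        constructor
        · intro h
          have h0 : (xs.zip ys).countP (fun p => p.1 != p.2) = 0 := by omega
          have := (pvCount_zero_iff xs ys hb').mp h0
          exact ⟨[], x, y, xs, hxy, by simp, by simp [this]⟩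
        · rintro ⟨u, c, d, v, hcd, hu, hv⟩
          cases u with
          | nil =>
            simp only [List.nil_append, List.cons.injEq] at hu hv
            have : xs = ys := hu.2.trans hv.2.symm
            rw [(pvCount_zero_iff xs ys hb').mpr this]
          | cons f u' =>
            simp only [List.cons_append, List.cons.injEq] at hu hv
            exact absurd (hu.1.trans hv.1.symm) hxy

-- the deletion branch (any over range with slices)
theorem pvDelScan_iff (a b : List Char) :
    ((List.range a.length).any (fun i => a.take i ++ a.drop (i+1) == b) = true) ↔ pvIsDel a b := by
  rw [List.any_eq_true]
  constructor
  · rintro ⟨i, hmem, heq⟩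
    have hi : i < a.length := List.mem_range.mp hmem
    have heq' : a.take i ++ a.drop (i+1) = b := beq_iff_eq.mp heq
    refine ⟨a.take i, a[i], a.drop (i+1), ?_, heq'.symm⟩
    conv_lhs => rw [← List.take_append_drop i a]
    rw [← List.getElem_cons_drop hi]
  · rintro ⟨u, c, v, rfl, rfl⟩
    refine ⟨u.length, List.mem_range.mpr (by simp), beq_iff_eq.mpr ?_⟩
    rw [List.take_left]
    congr 1
    rw [show u ++ c :: v = (u ++ [c]) ++ v by simp]
    rw [show u.length + 1 = (u ++ [c]).length by simp]
    exact List.drop_left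

theorem pvWithin1_iff (a b : List Char) : pvWithin1 a b = true ↔ pvEditSpec a b := by
  unfold pvWithin1
  by_cases hab : a = b
  · subst hab
    simp only [beq_self_eq_true, if_true]
    exact iff_of_true trivial (Or.inl rfl)
  · have hab' : (a == b) = false := beq_eq_false_iff_ne.mpr hab
    rw [hab', if_neg (by simp)]
    by_cases hlen : a.length = b.length
    · rw [if_pos (by simpa using hlen)]
      rw [show ((a.zip b).countP (fun p => p.1 != p.2) == 1) = true ↔
          (a.zip b).countP (fun p => p.1 != p.2) = 1 from beq_iff_eq]
      rw [pvCount_one_iff a b hlen]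
      constructor
      · intro h; exact Or.inr (Or.inl h)
      · rintro (heq | hsub | hdel | hdel)
        · exact absurd heq hab
        · exact hsub
        · have := pvIsDel_length hdel; omega
        · have := pvIsDel_length hdel; omega
    · rw [if_neg (by simpa using hlen)]
      by_cases hl1 : a.length = b.length + 1
      · rw [if_pos (by simpa using hl1)]
        rw [pvDelScan_iff]
        constructor
        · intro h; exact Or.inr (Or.inr (Or.inl h))
        · rintro (heq | hsub | hdel | hdel)
          · exact absurd heq hab
          · have := pvIsSub_length hsub; omega
          · exact hdel
          · have := pvIsDel_length hdel; omega
      · rw [if_neg (by simpa using hl1)]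
        by_cases hl2 : b.length = a.length + 1
        · rw [if_pos (by simpa using hl2)]
          rw [pvDelScan_iff]
          constructor
          · intro h; exact Or.inr (Or.inr (Or.inr h))
          · rintro (heq | hsub | hdel | hdel)
            · exact absurd heq hab
            · have := pvIsSub_length hsub; omega
            · have := pvIsDel_length hdel; omega
            · exact hdel
        · rw [if_neg (by simpa using hl2)]
          constructor
          · intro h; simp at h
          · rintro (heq | hsub | hdel | hdel)
            · exact absurd heq hab
            · exact absurd (pvIsSub_length hsub) hlen
            · exact absurd (pvIsDel_length hdel) hl1
            · exact absurd (pvIsDel_length hdel) hl2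

theorem pvCond_iff (w q : String) : pvWithin1 w.toList q.toList = true ↔ pvLevA w q false ≤ 1 := by
  have h1 : pvLevA w q false = pvLevR w.toList.reverse q.toList.reverse := by
    show pvLevACore w.toList q.toList = _
    rw [pvLevACore_eq]
    have h2 := pvF_eq_levR w.toList q.toList (w.toList.length + q.toList.length)
      w.toList.length q.toList.length le_rfl le_rfl le_rfl
    simpa only [List.take_length] using h2
  rw [pvWithin1_iff, h1, pvLevR_le_one_iff, pvEditSpec_reverse]

-- ---- assembly ----

theorem pvLoop_eq (w : String) : ∀ l, pvLoopA w l = pvLoopB w l := by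
  intro l
  induction l with
  | nil => rfl
  | cons p rest ih =>
    obtain ⟨q, st⟩ := p
    by_cases h : pvLevA w q false ≤ 1
    · simp only [pvLoopA, pvLoopB]
      rw [if_pos h, if_pos ((pvCond_iff w q).mpr h), pvLev_eq w st false]
    · simp only [pvLoopA, pvLoopB]
      rw [if_neg h, if_neg (fun hc => h ((pvCond_iff w q).mp hc))]
      exact ih

-- ===== VERDICT (by name: the statement is the Claim_ definition above) =====
set_option maxRecDepth 40000 in
theorem check_k_quirks_spec : Claim_equal_check_k_quirks := by
  intro word _
  unfold Spec_check_k_quirks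
  by_cases h1 : word = "IQLUSION"
  · subst h1
    rw [show check_k_quirks "IQLUSION"
        = (true, some "ILLUSION", some (pvLevA "IQLUSION" "ILLUSION" false)) from rfl]
    rw [show check_k_quirks_alt "IQLUSION"
        = (true, some "ILLUSION", some (pvLevB "IQLUSION" "ILLUSION" false)) from rfl]
    rw [pvLev_eq]
  by_cases h2 : word = "UNDERGRUUND"
  · subst h2
    rw [show check_k_quirks "UNDERGRUUND"
        = (true, some "UNDERGROUND", some (pvLevA "UNDERGRUUND" "UNDERGROUND" false)) from rfl]
    rw [show check_k_quirks_alt "UNDERGRUUND"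
        = (true, some "UNDERGROUND", some (pvLevB "UNDERGRUUND" "UNDERGROUND" false)) from rfl]
    rw [pvLev_eq]
  by_cases h3 : word = "DESPARATLY"
  · subst h3
    rw [show check_k_quirks "DESPARATLY"
        = (true, some "DESPERATELY", some (pvLevA "DESPARATLY" "DESPERATELY" false)) from rfl]
    rw [show check_k_quirks_alt "DESPARATLY"
        = (true, some "DESPERATELY", some (pvLevB "DESPARATLY" "DESPERATELY" false)) from rfl]
    rw [pvLev_eq]
  · have hg : PySem.Dict.get? pvQuirksA word = none := by
      rw [show pvQuirksA = PySem.Dict.mk [("IQLUSION", "ILLUSION"), ("UNDERGRUUND", "UNDERGROUND"),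
          ("DESPARATLY", "DESPERATELY")] from rfl]
      simp [Ne.symm h1, Ne.symm h2, Ne.symm h3, PySem.Dict.get?]
    show check_k_quirks word = check_k_quirks_alt word
    unfold check_k_quirks check_k_quirks_alt
    rw [hg]
    exact pvLoop_eq word _
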